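-- pv_equiv track=rewrite | github.com/alanbare/AOC25 | Python/Day 6/solution2.py | find_column_widths
-- ===== SOURCE A (Python) =====
-- def find_column_widths(op_row):
--     # counting real white space seperator but not counting the operation symbols cancels out except the first and last
--     widths=[]
--     curr_width = 0
--     for i in range(len(op_row)):
--         if op_row[i] in ['+', '*'] and i != 0:
--             widths.append(curr_width)
--             curr_width = 0
--         else:
--             curr_width += 1
--     widths.append(curr_width+1) # last one does not have a seperator after it
--     widths[0] -= 1  # first one includes the operation symbol
--
--     ops = [p for p in op_row.strip().split(' ') if p]
--     return ops, widths
-- ===== SOURCE B (Python) =====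
-- def find_column_widths(op_row):
--     idx = [i for i in range(len(op_row)) if op_row[i] in ('+', '*') and i != 0]
--     if not idx:
--         widths = [len(op_row)]
--     else:
--         widths = ([idx[0] - 1]
--                   + [b - a - 1 for a, b in zip(idx, idx[1:])]
--                   + [len(op_row) - idx[-1]])
--     ops = [p for p in op_row.strip().split(' ') if p]
--     return ops, widths
-- ===== Notes on version B (the rewrite author's own statement) =====
-- stated objective: alternative
-- what changed: B replaces A's running-width accumulator loop (with post-hoc first/last fix-ups) by collecting operator positions once and computing every width as a closed-form gap between consecutive positions.
import Mathlib
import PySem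

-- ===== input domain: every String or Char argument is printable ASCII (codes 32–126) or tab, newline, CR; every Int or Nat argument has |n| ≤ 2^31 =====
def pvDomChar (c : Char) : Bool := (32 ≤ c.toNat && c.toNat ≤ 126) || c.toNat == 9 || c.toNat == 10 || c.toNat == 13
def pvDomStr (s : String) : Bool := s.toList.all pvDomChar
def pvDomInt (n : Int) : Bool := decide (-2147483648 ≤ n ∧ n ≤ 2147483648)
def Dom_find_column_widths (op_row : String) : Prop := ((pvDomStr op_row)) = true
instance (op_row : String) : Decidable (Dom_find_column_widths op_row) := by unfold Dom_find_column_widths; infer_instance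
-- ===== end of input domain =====

-- B computes the widths from the list of operator positions (closed-form gaps) instead of A's running accumulator with first/last fix-ups.

-- ===== PORT A =====
-- A's for-loop over range(len(op_row)): state = (widths so far, current width), index i carried explicitly.
def fcwLoopA (i : Nat) (widths : List Int) (curr : Int) : List Char → List Int × Int
  | [] => (widths, curr)
  | c :: cs =>
    if (c == '+' || c == '*') && i != 0 then
      fcwLoopA (i + 1) (widths ++ [curr]) 0 cs
    else
      fcwLoopA (i + 1) widths (curr + 1) cs

-- widths[0] -= 1 (the list is never empty when A does this)
def fcwDecHead : List Int → List Int
  | [] => []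
  | w :: ws => (w - 1) :: ws

def find_column_widths (op_row : String) : List String × List Int :=
  let r := fcwLoopA 0 [] 0 op_row.toList
  let widths := fcwDecHead (r.1 ++ [r.2 + 1])
  let ops := ((PySem.Str.split? (PySem.Str.strip op_row) " ").getD []).filter (fun p => p ≠ "")
  (ops, widths)

-- ===== PORT B =====
-- [i for i in range(len(op_row)) if op_row[i] in ('+','*') and i != 0]
def fcwOpIdx (i : Nat) : List Char → List Int
  | [] => []
  | c :: cs =>
    if (c == '+' || c == '*') && i != 0 then (i : Int) :: fcwOpIdx (i + 1) cs
    else fcwOpIdx (i + 1) cs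

def find_column_widths_alt (op_row : String) : List String × List Int :=
  let cs := op_row.toList
  let idx := fcwOpIdx 0 cs
  let widths :=
    match idx with
    | [] => [(cs.length : Int)]
    | i0 :: _ =>
      (i0 - 1) :: (List.zipWith (fun a b => b - a - 1) idx idx.tail ++ [(cs.length : Int) - idx.getLastD 0])
  let ops := ((PySem.Str.split? (PySem.Str.strip op_row) " ").getD []).filter (fun p => p ≠ "")
  (ops, widths)

-- ===== PRECONDITION & SPEC =====
def Spec_find_column_widths (op_row : String) (out : List String × List Int) : Prop := out = find_column_widths_alt op_row
instance (op_row : String) (out : List String × List Int) : Decidable (Spec_find_column_widths op_row out) := by unfold Spec_find_column_widths; infer_instance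

-- ===== CLAIM (what is proved, stated in full; the proofs are below) =====
def Claim_equal_find_column_widths : Prop := ∀ (op_row : String), Dom_find_column_widths op_row → Spec_find_column_widths op_row (find_column_widths op_row)

-- ===== LEMMAS AND PROOFS =====

-- A's loop, fully characterised by the operator positions.
theorem fcwLoopA_spec : ∀ (cs : List Char) (i : Nat) (acc : List Int) (curr : Int),
    fcwLoopA i acc curr cs =
      match fcwOpIdx i cs with
      | [] => (acc, curr + cs.length)
      | i0 :: _ =>
        (acc ++ ((curr + i0 - i) :: List.zipWith (fun a b => b - a - 1) (fcwOpIdx i cs) (fcwOpIdx i cs).tail),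
         (i : Int) + cs.length - 1 - (fcwOpIdx i cs).getLastD 0) := by
  intro cs
  induction cs with
  | nil => intro i acc curr; simp [fcwLoopA, fcwOpIdx]
  | cons c cs ih =>
    intro i acc curr
    by_cases h : ((c == '+' || c == '*') && i != 0) = true
    · have hl : fcwLoopA i acc curr (c :: cs) = fcwLoopA (i+1) (acc ++ [curr]) 0 cs := by
        simp [fcwLoopA, h]
      have hx : fcwOpIdx i (c :: cs) = (i : Int) :: fcwOpIdx (i+1) cs := by
        simp [fcwOpIdx, h]
      rw [hl, hx, ih]
      cases hidx : fcwOpIdx (i+1) cs with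
      | nil => simp; omega
      | cons j rest =>
        simp only [List.getLastD_cons, List.tail_cons, List.zipWith_cons_cons,
          List.append_assoc, List.cons_append, Prod.mk.injEq,
          List.append_cancel_left_eq, List.cons.injEq, List.length_cons]
        refine ⟨?_, ?_⟩ <;> push_cast <;> ring_nf <;> simp
    · have hf : ((c == '+' || c == '*') && i != 0) = false := by
        cases hb : ((c == '+' || c == '*') && i != 0) with
        | false => rfl
        | true => exact absurd hb h
      have hl : fcwLoopA i acc curr (c :: cs) = fcwLoopA (i+1) acc (curr+1) cs := by
        simp [fcwLoopA, hf]
      have hx : fcwOpIdx i (c :: cs) = fcwOpIdx (i+1) cs := by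
        simp [fcwOpIdx, hf]
      rw [hl, hx, ih]
      cases hidx : fcwOpIdx (i+1) cs with
      | nil => simp; omega
      | cons j rest =>
        simp only [Prod.mk.injEq, List.append_cancel_left_eq, List.cons.injEq,
          List.length_cons]
        refine ⟨?_, ?_⟩ <;> push_cast <;> ring_nf <;> simp

-- ===== VERDICT (by name: the statement is the Claim_ definition above) =====
theorem find_column_widths_spec : Claim_equal_find_column_widths := by
  intro op_row _
  unfold Spec_find_column_widths find_column_widths find_column_widths_alt
  simp only [fcwLoopA_spec]
  cases hidx : fcwOpIdx 0 op_row.toList with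
  | nil => simp [fcwDecHead]
  | cons i0 rest =>
    simp only [List.getLastD_cons, fcwDecHead, List.cons_append, List.nil_append,
      Prod.mk.injEq, List.cons.injEq, Nat.cast_zero]
    refine ⟨?_, ?_⟩ <;> push_cast <;> ring_nf <;> simp
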